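-- pv_equiv track=rewrite | github.com/AlexFox63/skillfactory_rds | module_0/main.py | game_core_v1
-- ===== SOURCE A (Python) =====
-- def game_core_v1(number):
--     '''Берем сразу центр заданнаго диапазона и от этого пытаемся найти число
--        Функция принимает загаданное число и возвращает число попыток'''
--     count = 0
--     predict = 50
--     while number != predict:
--         count+=1
--         if predict < number:
--             predict *= 2
--         else:
--             predict -= 1
--     return(count) # выход из цикла, если угадали
-- ===== SOURCE B (Python) =====
-- def game_core_v1(number):
--     if number <= 50:
--         return 50 - number
--     m = (number + 49) // 50          # ceil(number/50), >= 2 here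
--     k = (m - 1).bit_length()         # smallest k with 50*2**k >= number
--     return k + 50 * (1 << k) - number
-- ===== Notes on version B (the rewrite author's own statement) =====
-- stated objective: faster
-- what changed: Replaced the step-by-step doubling/decrement loop by a closed form: for number<=50 return 50-number, otherwise compute the doubling count k via bit_length of ceil(number/50)-1 and return k + 50*2^k - number.
import Mathlib
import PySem

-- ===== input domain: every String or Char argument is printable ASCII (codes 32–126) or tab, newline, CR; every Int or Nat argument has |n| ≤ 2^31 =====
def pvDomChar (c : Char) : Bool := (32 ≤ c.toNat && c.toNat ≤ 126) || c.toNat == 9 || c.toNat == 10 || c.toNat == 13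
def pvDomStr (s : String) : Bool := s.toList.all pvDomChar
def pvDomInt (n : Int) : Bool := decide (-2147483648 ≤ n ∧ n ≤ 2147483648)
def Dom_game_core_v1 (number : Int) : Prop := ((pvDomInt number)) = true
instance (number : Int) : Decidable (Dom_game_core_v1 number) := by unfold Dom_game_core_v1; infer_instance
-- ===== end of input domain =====

-- B replaces A's one-step-at-a-time doubling/decrement loop by a closed form (O(1) vs O(number)).

-- ===== PORT A =====
-- the while-loop of A, step for step; fuel only makes the recursion total
-- (the starting fuel below is always sufficient, proved in the lemmas)
def gameLoopA (number : Int) : Nat → Int → Int → Int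
  | 0, count, _ => count
  | fuel + 1, count, predict =>
    if number = predict then count
    else if predict < number then gameLoopA number fuel (count + 1) (predict * 2)
    else gameLoopA number fuel (count + 1) (predict - 1)

def game_core_v1 (number : Int) : Int :=
  gameLoopA number (2 * number.natAbs + 200) 0 50

-- ===== PORT B =====
def game_core_v1_alt (number : Int) : Int :=
  if number ≤ 50 then 50 - number
  else
    let m := PySem.Int.floordiv (number + 49) 50   -- ceil(number/50)
    let k := Nat.size (m - 1).toNat                -- Python (m-1).bit_length()
    (k : Int) + 50 * 2 ^ k - number

-- ===== PRECONDITION & SPEC =====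
def Spec_game_core_v1 (number : Int) (out : Int) : Prop := out = game_core_v1_alt number
instance (number : Int) (out : Int) : Decidable (Spec_game_core_v1 number out) := by unfold Spec_game_core_v1; infer_instance

-- ===== CLAIM (what is proved, stated in full; the proofs are below) =====
def Claim_equal_game_core_v1 : Prop := ∀ (number : Int), Dom_game_core_v1 number → Spec_game_core_v1 number (game_core_v1 number)

-- ===== LEMMAS AND PROOFS =====

-- decrement phase: from predict ≥ number the loop counts down one by one
theorem gameLoopA_dec (number : Int) :
    ∀ (fuel : Nat) (count predict : Int), number ≤ predict →
    (predict - number).toNat < fuel →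
    gameLoopA number fuel count predict = count + (predict - number) := by
  intro fuel
  induction fuel with
  | zero => intro _ _ _ h; omega
  | succ f ih =>
    intro count predict hle hfuel
    by_cases h : number = predict
    · simp [gameLoopA, h]
    · have hlt : number < predict := lt_of_le_of_ne hle h
      have : ¬ predict < number := by omega
      rw [gameLoopA, if_neg h, if_neg this, ih (count + 1) (predict - 1) (by omega) (by omega)]
      ring

-- doubling phase: k doublings until predict·2^k ≥ number, then decrement phase
theorem gameLoopA_double (number : Int) :
    ∀ (k : Nat) (fuel : Nat) (count predict : Int), 0 < predict →
    number ≤ predict * 2 ^ k →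
    (∀ j : Nat, j < k → predict * 2 ^ j < number) →
    k + (predict * 2 ^ k - number).toNat < fuel →
    gameLoopA number fuel count predict = count + k + (predict * 2 ^ k - number) := by
  intro k
  induction k with
  | zero =>
    intro fuel count predict _ hge _ hfuel
    simp only [pow_zero, mul_one] at hge hfuel ⊢
    rw [gameLoopA_dec number fuel count predict hge (by omega)]
    ring
  | succ k ih =>
    intro fuel count predict hpos hge hlt hfuel
    have h0 : predict < number := by
      have := hlt 0 (by omega); simpa using this
    obtain ⟨f, rfl⟩ : ∃ f, fuel = f + 1 := ⟨fuel - 1, by omega⟩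
    have hne : number ≠ predict := by omega
    rw [gameLoopA, if_neg hne, if_pos h0,
      ih f (count + 1) (predict * 2) (by omega)
        (by rw [show predict * 2 * 2 ^ k = predict * 2 ^ (k + 1) by ring]; exact hge)
        (by intro j hj
            have := hlt (j + 1) (by omega)
            rw [show predict * 2 * 2 ^ j = predict * 2 ^ (j + 1) by ring]; exact this)
        (by rw [show predict * 2 * 2 ^ k = predict * 2 ^ (k + 1) by ring]; omega)]
    rw [show predict * 2 * 2 ^ k = predict * 2 ^ (k + 1) by ring]
    push_cast
    ring

-- ===== VERDICT (by name: the statement is the Claim_ definition above) =====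
theorem game_core_v1_spec : Claim_equal_game_core_v1 := by
  intro number _
  unfold Spec_game_core_v1 game_core_v1 game_core_v1_alt
  by_cases hle : number ≤ 50
  · rw [if_pos hle, gameLoopA_dec number _ 0 50 hle (by omega)]
    ring
  · rw [if_neg hle]
    have h50 : 50 < number := by omega
    set m : Int := PySem.Int.floordiv (number + 49) 50 with hm
    have hdm := PySem.Int.floordiv_mul_add_mod (number + 49) 50
    have hmod1 : 0 ≤ PySem.Int.mod (number + 49) 50 := by
      rw [PySem.Int.mod_eq_emod_of_pos (by omega : (0:Int) < 50)]
      exact Int.emod_nonneg _ (by omega)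
    have hmod2 : PySem.Int.mod (number + 49) 50 < 50 := by
      rw [PySem.Int.mod_eq_emod_of_pos (by omega : (0:Int) < 50)]
      exact Int.emod_lt_of_pos _ (by omega)
    rw [← hm] at hdm
    -- 50·m ≥ number and 50·(m-1) < number, and m ≥ 2
    have hub : number ≤ 50 * m := by omega
    have hlb : 50 * (m - 1) < number := by omega
    have hm2 : 2 ≤ m := by nlinarith
    set M : Nat := (m - 1).toNat with hM
    have hMm : (M : Int) = m - 1 := by omega
    set K : Nat := Nat.size M with hK
    have hMK : M < 2 ^ K := Nat.lt_size_self M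
    have hKpos : 1 ≤ K := Nat.size_pos.mpr (by omega)
    have hge : number ≤ 50 * 2 ^ K := by
      have : (M : Int) < (2 ^ K : Nat) := by exact_mod_cast hMK
      push_cast at this
      nlinarith
    have hltj : ∀ j : Nat, j < K → (50 : Int) * 2 ^ j < number := by
      intro j hj
      have h2j : 2 ^ j ≤ M := Nat.lt_size.mp (by omega)
      have : ((2 ^ j : Nat) : Int) ≤ (M : Int) := by exact_mod_cast h2j
      push_cast at this
      nlinarith
    have hgl := gameLoopA_double number K (2 * number.natAbs + 200) 0 50 (by omega) hge hltj ?_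
    · rw [hgl]; ring
    · -- fuel is sufficient
      have hKlast := hltj (K - 1) (by omega)
      have heq : (2 : Int) ^ K = 2 * 2 ^ (K - 1) := by
        conv_lhs => rw [show K = (K - 1) + 1 by omega]
        rw [pow_succ]; ring
      have hKsmall : ((K - 1 : Nat) : Int) < 2 ^ (K - 1) := by
        exact_mod_cast Nat.lt_two_pow_self
      have h2p : (2 : Int) ^ (K - 1) ≤ 50 * 2 ^ (K - 1) := by nlinarith [pow_pos (by norm_num : (0:Int) < 2) (K - 1)]
      omega
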